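-- pv_equiv track=rewrite | github.com/marcopellegrinoo/rise-video | XAI/spatial_temporal/scripts/lime_shap_st.py | cluster_seasons
-- ===== SOURCE A (Python) =====
-- def cluster_seasons(seasons):
--     clusters = []
--     start_index = 0
--
--     for i in range(1, len(seasons)):
--         if seasons[i] != seasons[i - 1]:  # Season changes
--             clusters.append((start_index, i - 1, seasons[start_index]))  # Save the previous cluster
--             start_index = i  # Start a new cluster
--
--     # Add the last cluster
--     clusters.append((start_index, len(seasons) - 1, seasons[start_index]))
--
--     return clusters
-- ===== SOURCE B (Python) =====
-- def cluster_seasons(seasons):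
--     rev = []
--     e = len(seasons) - 1
--     while e >= 0:
--         s = e
--         while s - 1 >= 0 and seasons[s - 1] == seasons[e]:
--             s -= 1
--         rev.append((s, e, seasons[e]))
--         e = s - 1
--     return rev[::-1]
-- ===== Notes on version B (the rewrite author's own statement) =====
-- stated objective: alternative
-- what changed: B traverses the list BACK-TO-FRONT, peeling one whole run at a time (an inner loop walks the run start backwards comparing each element to the run's end), collects the clusters in reverse order and reverses at the end, instead of A's single forward pass that detects change points between adjacent elements with a carried start_index.
import Mathlib
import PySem

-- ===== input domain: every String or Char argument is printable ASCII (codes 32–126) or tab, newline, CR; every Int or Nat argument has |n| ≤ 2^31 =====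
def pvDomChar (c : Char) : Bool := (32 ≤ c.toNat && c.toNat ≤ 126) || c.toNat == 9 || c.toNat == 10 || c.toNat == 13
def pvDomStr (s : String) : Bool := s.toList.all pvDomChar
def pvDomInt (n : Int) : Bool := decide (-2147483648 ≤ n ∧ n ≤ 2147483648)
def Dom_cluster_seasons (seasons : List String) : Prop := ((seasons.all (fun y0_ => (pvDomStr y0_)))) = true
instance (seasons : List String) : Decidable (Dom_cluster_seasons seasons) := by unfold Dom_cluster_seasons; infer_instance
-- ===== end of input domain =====

-- B groups consecutive equal seasons by a backwards traversal that peels whole runs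
-- (comparing each element to the run's end) and reverses at the end, instead of A's
-- forward change-point scan; same O(n) cost ("alternative").

-- ===== PORT A =====
-- A's single forward loop: state (clusters, start_index); append the previous cluster at each change.
def cluster_seasons (seasons : List String) : List (Int × Int × String) :=
  let n : Int := seasons.length
  let st :=
    (PySem.List.pyRange 1 n 1).foldl
      (fun (acc : List (Int × Int × String) × Int) i =>
        if (PySem.List.pyGet? seasons i).getD "" ≠ (PySem.List.pyGet? seasons (i - 1)).getD "" then
          (acc.1 ++ [(acc.2, i - 1, (PySem.List.pyGet? seasons acc.2).getD "")], i)
        else acc)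
      ([], 0)
  st.1 ++ [(st.2, n - 1, (PySem.List.pyGet? seasons st.2).getD "")]

-- ===== PORT B =====
-- B's inner while: walk the run start s backwards while seasons[s-1] == seasons[e].
def pvAltInner (seasons : List String) (e s : Int) : Int :=
  if h : 0 ≤ s - 1 ∧ (PySem.List.pyGet? seasons (s - 1)).getD "" = (PySem.List.pyGet? seasons e).getD "" then
    pvAltInner seasons e (s - 1)
  else s
termination_by s.toNat
decreasing_by omega

theorem pvAltInner_le (seasons : List String) (e s : Int) : pvAltInner seasons e s ≤ s := by
  unfold pvAltInner
  split
  · have := pvAltInner_le seasons e (s - 1); omega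
  · omega
termination_by s.toNat
decreasing_by rename_i h; omega

-- B's outer while: emit the run (s, e, seasons[e]), continue below it; clusters in reverse.
def pvAltOuter (seasons : List String) (e : Int) : List (Int × Int × String) :=
  if h : 0 ≤ e then
    let s := pvAltInner seasons e e
    (s, e, (PySem.List.pyGet? seasons e).getD "") :: pvAltOuter seasons (s - 1)
  else []
termination_by (e + 1).toNat
decreasing_by have := pvAltInner_le seasons e e; omega

def cluster_seasons_alt (seasons : List String) : List (Int × Int × String) :=
  (pvAltOuter seasons ((seasons.length : Int) - 1)).reverse


-- ===== PRECONDITION & SPEC =====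
-- Pre_ excludes only the empty list, on which A raises IndexError (seasons[start_index]).
def Pre_cluster_seasons (seasons : List String) : Prop := seasons ≠ []
instance (seasons : List String) : Decidable (Pre_cluster_seasons seasons) := by unfold Pre_cluster_seasons; infer_instance
def pvWitness_cluster_seasons : List String := (["a", "a", "b"])

def Spec_cluster_seasons (seasons : List String) (out : List (Int × Int × String)) : Prop := out = cluster_seasons_alt seasons
instance (seasons : List String) (out : List (Int × Int × String)) : Decidable (Spec_cluster_seasons seasons out) := by unfold Spec_cluster_seasons; infer_instance

-- ===== CLAIM (what is proved, stated in full; the proofs are below) =====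
def Claim_equal_cluster_seasons : Prop := ∀ (seasons : List String), Dom_cluster_seasons seasons → Pre_cluster_seasons seasons → Spec_cluster_seasons seasons (cluster_seasons seasons)
-- ===== LEMMAS AND PROOFS =====

theorem pvAltOuter_neg (seasons : List String) (e : Int) (h : e < 0) :
    pvAltOuter seasons e = [] := by
  rw [pvAltOuter]
  rw [dif_neg (by omega)]

-- abbreviations used only inside the proofs
def pvGet (seasons : List String) (i : Int) : String := (PySem.List.pyGet? seasons i).getD ""

def pvChg (seasons : List String) (i : Int) : Bool :=
  decide ((PySem.List.pyGet? seasons i).getD "" ≠ (PySem.List.pyGet? seasons (i - 1)).getD "")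

def pvMk (seasons : List String) (q : Int × Int) : Int × Int × String :=
  (q.1, q.2 - 1, (PySem.List.pyGet? seasons q.1).getD "")

-- A's fold over any index list L, characterized by the filtered change list F
theorem pvFoldChar (seasons : List String) (L : List Int)
    (acc : List (Int × Int × String)) (s : Int) :
    L.foldl
      (fun (acc : List (Int × Int × String) × Int) i =>
        if (PySem.List.pyGet? seasons i).getD "" ≠ (PySem.List.pyGet? seasons (i - 1)).getD "" then
          (acc.1 ++ [(acc.2, i - 1, (PySem.List.pyGet? seasons acc.2).getD "")], i)
        else acc)
      (acc, s)
    = (acc ++ (((s :: L.filter (pvChg seasons)).zip (L.filter (pvChg seasons))).map (pvMk seasons)),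
       (L.filter (pvChg seasons)).getLastD s) := by
  induction L generalizing acc s with
  | nil => simp
  | cons i L ih =>
    by_cases h : (PySem.List.pyGet? seasons i).getD "" = (PySem.List.pyGet? seasons (i - 1)).getD ""
    · simp only [List.foldl_cons]
      rw [if_neg (by simp [h])]
      rw [ih]
      have hf : List.filter (pvChg seasons) (i :: L) = List.filter (pvChg seasons) L := by
        simp [pvChg, h]
      rw [hf]
    · have h' : (PySem.List.pyGet? seasons i).getD "" ≠ (PySem.List.pyGet? seasons (i - 1)).getD "" := h
      simp only [List.foldl_cons]
      rw [if_pos h']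
      rw [ih]
      have hf : List.filter (pvChg seasons) (i :: L) = i :: List.filter (pvChg seasons) L := by
        simp [pvChg, h]
      rw [hf, List.getLastD_cons]
      simp [pvMk, List.append_assoc]

-- zipping starts with ends (= next starts padded with n) appends the final cluster
theorem pvZipPad (seasons : List String) (s n : Int) (F : List Int) :
    ((s :: F).zip (F ++ [n])).map (pvMk seasons)
    = ((s :: F).zip F).map (pvMk seasons) ++ [pvMk seasons (F.getLastD s, n)] := by
  induction F generalizing s with
  | nil => simp
  | cons a F ih =>
    simp only [List.cons_append, List.zip_cons_cons, List.map_cons]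
    rw [ih, List.getLastD_cons]

-- A's closed form: clusters are consecutive pairs of 0 :: change-points :: n
theorem pvAChar (seasons : List String) :
    cluster_seasons seasons
    = ((0 :: (PySem.List.pyRange 1 (seasons.length : Int) 1).filter (pvChg seasons)).zip
        ((PySem.List.pyRange 1 (seasons.length : Int) 1).filter (pvChg seasons) ++ [(seasons.length : Int)])).map (pvMk seasons) := by
  unfold cluster_seasons
  simp only []
  rw [pvFoldChar seasons]
  rw [pvZipPad]
  simp [pvMk]

-- the inner while loop: its result s' is the start of the run ending at e
theorem pvInnerSpec (seasons : List String) (e s : Int) (h0 : 0 ≤ s)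
    (hse : pvGet seasons s = pvGet seasons e) :
    0 ≤ pvAltInner seasons e s ∧ pvAltInner seasons e s ≤ s ∧
    pvGet seasons (pvAltInner seasons e s) = pvGet seasons e ∧
    (pvAltInner seasons e s = 0 ∨ (1 ≤ pvAltInner seasons e s ∧ pvChg seasons (pvAltInner seasons e s) = true)) ∧
    (∀ k, pvAltInner seasons e s < k → k ≤ s → pvChg seasons k = false) := by
  unfold pvAltInner
  split
  · rename_i h
    have ih := pvInnerSpec seasons e (s - 1) (by omega) h.2
    refine ⟨ih.1, by have := ih.2.1; omega, ih.2.2.1, ih.2.2.2.1, ?_⟩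
    intro k hk1 hk2
    by_cases hks : k ≤ s - 1
    · exact ih.2.2.2.2 k hk1 hks
    · have : k = s := by omega
      subst this
      simp only [pvChg, pvGet] at hse h ⊢
      simp [h.2, hse]
  · rename_i h
    refine ⟨h0, le_refl s, hse, ?_, by intro k hk1 hk2; omega⟩
    by_cases hz : s = 0
    · exact Or.inl hz
    · refine Or.inr ⟨by omega, ?_⟩
      simp only [pvChg, pvGet]
      simp only [decide_eq_true_eq]
      intro hc
      exact h ⟨by omega, by rw [← hc]; exact hse⟩
termination_by s.toNat
decreasing_by rename_i h _; omega

-- if change(s) and no change in (s, e], the change points up to e are those up to s-1 plus s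
theorem pvFilterSplit (seasons : List String) (s e : Int) (h1 : 1 ≤ s) (hse : s ≤ e)
    (hs : pvChg seasons s = true) (hint : ∀ k, s < k → k ≤ e → pvChg seasons k = false) :
    (PySem.List.pyRange 1 (e + 1) 1).filter (pvChg seasons)
    = (PySem.List.pyRange 1 s 1).filter (pvChg seasons) ++ [s] := by
  rw [PySem.List.pyRange_one_append 1 s (e + 1) h1 (by omega), List.filter_append]
  congr 1
  rw [PySem.List.pyRange_one_cons (by omega)]
  rw [List.filter_cons_of_pos hs]
  have : List.filter (pvChg seasons) (PySem.List.pyRange (s + 1) (e + 1) 1) = [] := by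
    rw [List.filter_eq_nil_iff]
    intro k hk
    rw [PySem.List.mem_pyRange_one] at hk
    simp [hint k (by omega) (by omega)]
  rw [this]
-- helper for the zip assembly: moving the last run out of the zip
theorem pvZipSnoc (f : Int × Int → Int × Int × String) (x y z : Int) (L : List Int) :
    ((x :: (L ++ [y])).zip ((L ++ [y]) ++ [z])).map f
    = ((x :: L).zip (L ++ [y])).map f ++ [f (y, z)] := by
  induction L generalizing x with
  | nil => simp
  | cons a L ih =>
    simp only [List.cons_append, List.zip_cons_cons, List.map_cons, ih a]

-- the outer loop, reversed, equals the zip closed form on the prefix [0, e]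
theorem pvOuterChar (seasons : List String) (e : Int) (h0 : 0 ≤ e)
    (hn : e < (seasons.length : Int)) :
    (pvAltOuter seasons e).reverse
    = ((0 :: (PySem.List.pyRange 1 (e + 1) 1).filter (pvChg seasons)).zip
        ((PySem.List.pyRange 1 (e + 1) 1).filter (pvChg seasons) ++ [e + 1])).map (pvMk seasons) := by
  obtain ⟨hs0, hsle, hseq, hstart, hint⟩ := pvInnerSpec seasons e e h0 rfl
  rw [pvAltOuter, dif_pos h0]
  show ((pvAltInner seasons e e, e, (PySem.List.pyGet? seasons e).getD "") ::
      pvAltOuter seasons (pvAltInner seasons e e - 1)).reverse = _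
  set s := pvAltInner seasons e e with hsdef
  rcases hstart with hz | ⟨hs1, hchg⟩
  · -- run starts at 0: no change points in (0, e], single cluster
    have hF : (PySem.List.pyRange 1 (e + 1) 1).filter (pvChg seasons) = [] := by
      rw [List.filter_eq_nil_iff]
      intro k hk
      rw [PySem.List.mem_pyRange_one] at hk
      simp [hint k (by omega) (by omega)]
    rw [pvAltOuter_neg seasons (s - 1) (by omega)]
    simp [hF, pvMk, pvGet] at hseq ⊢
    rw [← hz, hseq]
    exact ⟨rfl, rfl⟩
  · -- run starts at s ≥ 1 with change(s); recurse on the prefix [0, s-1]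
    have ih := pvOuterChar seasons (s - 1) (by omega) (by omega)
    simp only [List.reverse_cons]
    rw [ih]
    have hsplit := pvFilterSplit seasons s e hs1 hsle hchg hint
    have hs' : s - 1 + 1 = s := by omega
    rw [hs'] at ih ⊢
    rw [hsplit, pvZipSnoc]
    congr 1
    simp [pvMk, pvGet] at hseq ⊢
    rw [hseq]
termination_by (e + 1).toNat
decreasing_by have := pvAltInner_le seasons e e; omega

-- ===== VERDICT (by name: the statement is the Claim_ definition above) =====
theorem cluster_seasons_spec : Claim_equal_cluster_seasons := by
  intro seasons _ hpre
  unfold Spec_cluster_seasons cluster_seasons_alt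
  have hn : 1 ≤ (seasons.length : Int) := by
    have : seasons.length ≠ 0 := by simpa [List.length_eq_zero_iff] using hpre
    omega
  rw [pvOuterChar seasons ((seasons.length : Int) - 1) (by omega) (by omega)]
  rw [pvAChar]
  have : (seasons.length : Int) - 1 + 1 = (seasons.length : Int) := by omega
  rw [this]
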